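-- pv_equiv track=rewrite | github.com/pmco23/incidentfox | slack-bot/modal_builder.py | _format_plain_output
-- ===== SOURCE A (Python) =====
-- EM_SPACE = "\u2003"
--
-- def _format_plain_output(content: str, max_lines: int) -> str:
--     """
--     Format plain output with ... +N lines truncation.
--     """
--     # Slack section blocks have 3000 char limit - keep output under 2500 to be safe
--     MAX_CHARS = 2500
--
--     lines = content.split("\n")
--     total_lines = len(lines)
--
--     # Show first max_lines (or fewer if we hit char limit)
--     output_lines = []
--     char_count = 0
--     lines_shown = 0
--
--     for i, line in enumerate(lines[:max_lines]):
--         # Truncate individual long lines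
--         if len(line) > 120:
--             line = line[:120] + "..."
--
--         if char_count + len(line) + 1 > MAX_CHARS:
--             break
--
--         output_lines.append(line)
--         char_count += len(line) + 1  # +1 for newline
--         lines_shown = i + 1
--
--     result = "\n".join(output_lines)
--
--     # Add truncation indicator if needed
--     remaining = total_lines - lines_shown
--     if remaining > 0:
--         result += f"\n   ... +{remaining} {'line' if remaining == 1 else 'lines'}"
--
--     # Wrap in indented code block
--     return f"{EM_SPACE}{EM_SPACE}```\n{result}\n```"
-- ===== SOURCE B (Python) =====
-- EM_SPACE = "\u2003"
--
-- def _format_plain_output(content: str, max_lines: int) -> str: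
--     """Format plain output with ... +N lines truncation.
--
--     Staged pipeline: truncate candidate lines, build cumulative character
--     costs, locate the cutoff by binary search over the monotone cost array
--     (costs are strictly increasing, so the bisection index equals the longest
--     prefix fitting the budget), then slice/join once.
--     """
--     MAX_CHARS = 2500
--     lines = content.split("\n")
--     shown = [l[:120] + "..." if len(l) > 120 else l for l in lines[:max_lines]]
--
--     # cum[i] = chars (incl. trailing newline) needed for shown[:i+1]
--     cum = []
--     c = 0
--     for l in shown:
--         c += len(l) + 1
--         cum.append(c)
--
--     # binary search (bisect_right by hand): largest k with cum[k-1] <= MAX_CHARS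
--     lo, hi = 0, len(cum)
--     while lo < hi:
--         mid = (lo + hi) // 2
--         if cum[mid] <= MAX_CHARS:
--             lo = mid + 1
--         else:
--             hi = mid
--     k = lo
--
--     body = "\n".join(shown[:k])
--     remaining = len(lines) - k
--     if remaining > 0:
--         body += "\n   ... +{} {}".format(remaining, "line" if remaining == 1 else "lines")
--     return f"{EM_SPACE}{EM_SPACE}```\n{body}\n```"
-- ===== Notes on version B (the rewrite author's own statement) =====
-- stated objective: alternative
-- what changed: Replaces A's single stateful greedy loop (running char_count, lines_shown, early break) with a staged pipeline: truncate all candidate lines, build a prefix-sum array of character costs, find the cutoff by binary search (hand-written bisect_right) over the monotone prefix sums, then slice and join once.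
import Mathlib
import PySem

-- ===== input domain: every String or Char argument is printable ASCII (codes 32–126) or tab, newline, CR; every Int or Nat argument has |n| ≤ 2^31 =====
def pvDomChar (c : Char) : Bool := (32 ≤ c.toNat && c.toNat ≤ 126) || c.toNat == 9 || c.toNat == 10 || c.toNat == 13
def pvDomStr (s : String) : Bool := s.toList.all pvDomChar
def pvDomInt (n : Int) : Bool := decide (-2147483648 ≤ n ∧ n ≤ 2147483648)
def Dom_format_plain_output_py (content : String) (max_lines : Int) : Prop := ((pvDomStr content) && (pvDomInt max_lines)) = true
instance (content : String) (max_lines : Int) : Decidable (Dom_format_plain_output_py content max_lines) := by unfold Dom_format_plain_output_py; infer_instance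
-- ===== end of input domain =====

-- B replaces A's single greedy loop by a staged pipeline (truncate all, prefix-sum the costs, binary-search the cutoff, slice/join); alternative decomposition, same cost.

-- ===== PORT A =====
-- A's for-loop over enumerate(lines[:max_lines]) with state (output_lines, char_count, lines_shown) and an early break
def pvLoopA : List String → Int → List String → Int → Int → (List String × Int)
  | [], _, out, _, shown => (out, shown)
  | l :: rest, i, out, cc, shown =>
    let line := if ((PySem.Str.len l : Int)) > 120 then PySem.Str.slice l none (some 120) ++ "..." else l
    if cc + (PySem.Str.len line : Int) + 1 > 2500 then (out, shown)
    else pvLoopA rest (i + 1) (out ++ [line]) (cc + (PySem.Str.len line : Int) + 1) (i + 1)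

def format_plain_output_py (content : String) (max_lines : Int) : String :=
  let lines := (PySem.Str.split? content "\n").getD []  -- sep "\n" ≠ "", so split? is always `some`; the default is unreachable
  let total : Int := lines.length
  let r := pvLoopA (PySem.List.slice lines none (some max_lines)) 0 [] 0 0
  let result := PySem.Str.join "\n" r.1
  let remaining : Int := total - r.2
  let result := if remaining > 0 then
      result ++ "\n   ... +" ++ PySem.Int.toStr remaining ++ " " ++ (if remaining == 1 then "line" else "lines")
    else result
  "\u2003\u2003```\n" ++ result ++ "\n```"

-- ===== PORT B =====
-- B's prefix-sum builder: cum[i] = running char cost (len + 1 per line) of shown[:i+1]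
def pvCum : List String → Int → List Int
  | [], _ => []
  | l :: rest, c => (c + (PySem.Str.len l : Int) + 1) :: pvCum rest (c + (PySem.Str.len l : Int) + 1)

-- B's hand-written bisect_right while-loop over the prefix-sum array (cum[mid] is always
-- in range when lo < hi ≤ len cum, so getD's default is unreachable — exact for in-range indexing)
def pvBisect (cum : List Int) (lo hi : Nat) : Nat :=
  if lo < hi then
    if cum.getD ((lo + hi) / 2) 0 ≤ 2500 then pvBisect cum ((lo + hi) / 2 + 1) hi
    else pvBisect cum lo ((lo + hi) / 2)
  else lo
termination_by hi - lo
decreasing_by all_goals omega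

def format_plain_output_py_alt (content : String) (max_lines : Int) : String :=
  let lines := (PySem.Str.split? content "\n").getD []  -- sep "\n" ≠ "", so split? is always `some`; the default is unreachable
  let shown := (PySem.List.slice lines none (some max_lines)).map
      (fun l => if ((PySem.Str.len l : Int)) > 120 then PySem.Str.slice l none (some 120) ++ "..." else l)
  let cum := pvCum shown 0
  let k := pvBisect cum 0 cum.length
  let body := PySem.Str.join "\n" (shown.take k)
  let remaining : Int := (lines.length : Int) - (k : Int)
  let body := if remaining > 0 then
      body ++ "\n   ... +" ++ PySem.Int.toStr remaining ++ " " ++ (if remaining == 1 then "line" else "lines")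
    else body
  "\u2003\u2003```\n" ++ body ++ "\n```"

-- ===== PRECONDITION & SPEC =====
def Spec_format_plain_output_py (content : String) (max_lines : Int) (out : String) : Prop := out = format_plain_output_py_alt content max_lines
instance (content : String) (max_lines : Int) (out : String) : Decidable (Spec_format_plain_output_py content max_lines out) := by unfold Spec_format_plain_output_py; infer_instance

-- ===== CLAIM (what is proved, stated in full; the proofs are below) =====
def Claim_equal_format_plain_output_py : Prop := ∀ (content : String) (max_lines : Int), Dom_format_plain_output_py content max_lines → Spec_format_plain_output_py content max_lines (format_plain_output_py content max_lines)

-- ===== LEMMAS AND PROOFS =====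
-- greedy fit count: the number of leading lines whose (len+1) costs fit in the budget
def pvCountFit : List String → Int → Nat
  | [], _ => 0
  | l :: rest, budget =>
    if (PySem.Str.len l : Int) + 1 ≤ budget then pvCountFit rest (budget - ((PySem.Str.len l : Int) + 1)) + 1
    else 0

lemma pvStrLen_nonneg (l : String) : 0 ≤ PySem.Str.len l := by
  rw [PySem.Str.len_eq]; exact Int.natCast_nonneg _

lemma pvCountFit_of_nonpos (xs : List String) (b : Int) (hb : b ≤ 0) : pvCountFit xs b = 0 := by
  cases xs with
  | nil => rfl
  | cons l rest =>
    have hlen := pvStrLen_nonneg l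
    have h : ¬ ((PySem.Str.len l : Int) + 1 ≤ b) := by omega
    rw [pvCountFit, if_neg h]

lemma pvCountFit_le_length (xs : List String) : ∀ b : Int, pvCountFit xs b ≤ xs.length := by
  induction xs with
  | nil => intro b; simp [pvCountFit]
  | cons l rest ih =>
    intro b
    simp only [pvCountFit, List.length_cons]
    split_ifs with h
    · exact Nat.succ_le_succ (ih _)
    · omega

lemma pvCum_length (xs : List String) : ∀ c : Int, (pvCum xs c).length = xs.length := by
  induction xs with
  | nil => intro c; rfl
  | cons l rest ih => intro c; simp [pvCum, ih]

-- cum entry i is ≤ 2500 exactly when line i is still within the greedy fit count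
lemma pvCum_getD_le_iff (xs : List String) : ∀ (c : Int) (i : Nat), i < xs.length →
    ((pvCum xs c).getD i 0 ≤ 2500 ↔ i < pvCountFit xs (2500 - c)) := by
  induction xs with
  | nil => intro c i h; simp at h
  | cons l rest ih =>
    intro c i h
    have hlen := pvStrLen_nonneg l
    cases i with
    | zero =>
      rw [pvCum, List.getD_cons_zero, pvCountFit]
      by_cases hfit : (PySem.Str.len l : Int) + 1 ≤ 2500 - c
      · rw [if_pos hfit]
        constructor
        · intro _; exact Nat.succ_pos _
        · intro _; omega
      · rw [if_neg hfit]
        constructor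
        · intro hle; omega
        · intro hlt; omega
    | succ j =>
      simp only [List.length_cons] at h
      have hj : j < rest.length := by omega
      rw [pvCum, List.getD_cons_succ, pvCountFit]
      have harith : 2500 - (c + (PySem.Str.len l : Int) + 1) = 2500 - c - ((PySem.Str.len l : Int) + 1) := by ring
      have hih := ih (c + (PySem.Str.len l : Int) + 1) j hj
      rw [harith] at hih
      by_cases hfit : (PySem.Str.len l : Int) + 1 ≤ 2500 - c
      · rw [if_pos hfit, hih]
        omega
      · rw [if_neg hfit]
        have hz : pvCountFit rest (2500 - c - ((PySem.Str.len l : Int) + 1)) = 0 :=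
          pvCountFit_of_nonpos _ _ (by omega)
        rw [hz] at hih
        omega

-- binary search over an array whose entries are ≤ 2500 exactly below index k finds k
lemma pvBisect_eq (cum : List Int) (k : Nat)
    (hiff : ∀ i : Nat, i < cum.length → (cum.getD i 0 ≤ 2500 ↔ i < k)) :
    ∀ (d lo hi : Nat), hi - lo ≤ d → hi ≤ cum.length → lo ≤ k → k ≤ hi →
      pvBisect cum lo hi = k := by
  intro d
  induction d with
  | zero =>
    intro lo hi hd hhi hlo hk
    rw [pvBisect]
    have : ¬ lo < hi := by omega
    rw [if_neg this]
    omega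
  | succ d ih =>
    intro lo hi hd hhi hlo hk
    rw [pvBisect]
    by_cases hlt : lo < hi
    · rw [if_pos hlt]
      have hmid₁ : lo ≤ (lo + hi) / 2 := by omega
      have hmid₂ : (lo + hi) / 2 < hi := by omega
      have hmlen : (lo + hi) / 2 < cum.length := by omega
      by_cases hle : cum.getD ((lo + hi) / 2) 0 ≤ 2500
      · rw [if_pos hle]
        have : (lo + hi) / 2 < k := (hiff _ hmlen).mp hle
        exact ih _ _ (by omega) hhi (by omega) hk
      · rw [if_neg hle]
        have : ¬ ((lo + hi) / 2 < k) := fun h => hle ((hiff _ hmlen).mpr h)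
        exact ih _ _ (by omega) (by omega) hlo (by omega)
    · rw [if_neg hlt]; omega

-- closed form of A's loop: it appends the greedy fit prefix and counts it
lemma pvLoopA_eq (xs : List String) : ∀ (i : Int) (out : List String) (cc : Int),
    pvLoopA xs i out cc i =
      (out ++ (xs.map (fun l => if ((PySem.Str.len l : Int)) > 120 then PySem.Str.slice l none (some 120) ++ "..." else l)).take
          (pvCountFit (xs.map (fun l => if ((PySem.Str.len l : Int)) > 120 then PySem.Str.slice l none (some 120) ++ "..." else l)) (2500 - cc)),
        i + (pvCountFit (xs.map (fun l => if ((PySem.Str.len l : Int)) > 120 then PySem.Str.slice l none (some 120) ++ "..." else l)) (2500 - cc) : Nat)) := by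
  induction xs with
  | nil => intro i out cc; simp [pvLoopA, pvCountFit]
  | cons l rest ih =>
    intro i out cc
    simp only [pvLoopA, List.map_cons, pvCountFit]
    generalize (if PySem.Str.len l > 120 then PySem.Str.slice l none (some 120) ++ "..." else l) = t
    by_cases h : cc + PySem.Str.len t + 1 > 2500
    · have h2 : ¬ (PySem.Str.len t + 1 ≤ 2500 - cc) := by omega
      rw [if_pos h, if_neg h2]; simp
    · have h2 : PySem.Str.len t + 1 ≤ 2500 - cc := by omega
      rw [if_neg h, if_pos h2, ih]
      simp only [sub_add_eq_sub_sub]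
      rw [Prod.mk.injEq]
      exact ⟨by simp, by push_cast; ring⟩

-- B's binary-searched cutoff equals A's greedy fit count
lemma pvBisect_cum_eq_countFit (xs : List String) :
    pvBisect (pvCum xs 0) 0 (pvCum xs 0).length = pvCountFit xs 2500 := by
  have hiff : ∀ i : Nat, i < (pvCum xs 0).length →
      ((pvCum xs 0).getD i 0 ≤ 2500 ↔ i < pvCountFit xs 2500) := by
    intro i hi
    rw [pvCum_length] at hi
    simpa using pvCum_getD_le_iff xs 0 i hi
  exact pvBisect_eq _ _ hiff _ 0 _ (le_refl _)
    (le_refl _) (Nat.zero_le _)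
    (by rw [pvCum_length]; exact pvCountFit_le_length xs 2500)

-- ===== VERDICT (by name: the statement is the Claim_ definition above) =====
theorem format_plain_output_py_spec : Claim_equal_format_plain_output_py := by
  intro content max_lines _
  unfold Spec_format_plain_output_py format_plain_output_py format_plain_output_py_alt
  simp only [pvLoopA_eq, pvBisect_cum_eq_countFit, List.nil_append, sub_zero, zero_add]
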